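-- pv_equiv track=rewrite | github.com/jacobrose-dev/snippets | generate_A1_grid.py | generate_cells
-- ===== SOURCE A (Python) =====
-- def generate_cells(width, height):
--     """Generates cell-names for an 'A1 Reference Style' grid,
--         and places them into a dictionary with empty values.
--     width and height parameters are both = integer > zero"""
--
--     alphabet = 'ABCDEFGHIJKLMNOPQRSTUVWXYZ' # explicit to avoid import
--     empty_grid = {}
--     for column in range(1, width+1):
--
--         bijective_hexavigesimal = []
--         while column: # repetitiously reduce unit with divmod()
--             column, remainder = divmod(column - 1, 26)
--             bijective_hexavigesimal[:0] = alphabet[remainder]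
--
--         column = ''.join(bijective_hexavigesimal)
--
--         for row in range(1, height+1):
--             cell = column + str(row)
--             empty_grid[cell] = ''
--
--     return empty_grid
-- ===== SOURCE B (Python) =====
-- def generate_cells(width, height):
--     """Generates cell-names for an 'A1 Reference Style' grid,
--         and places them into a dictionary with empty values.
--     width and height parameters are both = integer > zero"""
--     alphabet = 'ABCDEFGHIJKLMNOPQRSTUVWXYZ'
--     # Lexicographic generate-and-take: labels of length 1, 2, 3, ... in order
--     # are exactly A..Z, AA..ZZ, ... i.e. bijective base-26 for 1, 2, 3, ...
--     labels = []
--     block = ['']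
--     while len(labels) < width:
--         block = [prefix + letter for prefix in block for letter in alphabet]
--         labels.extend(block)
--     return {col + str(row): '' for col in labels[:width] for row in range(1, height + 1)}
-- ===== Notes on version B (the rewrite author's own statement) =====
-- stated objective: alternative
-- what changed: Column labels are produced by lexicographic generate-and-take (grow blocks of length-k strings A..Z, AA.., take the first `width`) instead of converting each column number to bijective base-26 with a per-column divmod loop; the grid is then one dict comprehension.
import Mathlib
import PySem

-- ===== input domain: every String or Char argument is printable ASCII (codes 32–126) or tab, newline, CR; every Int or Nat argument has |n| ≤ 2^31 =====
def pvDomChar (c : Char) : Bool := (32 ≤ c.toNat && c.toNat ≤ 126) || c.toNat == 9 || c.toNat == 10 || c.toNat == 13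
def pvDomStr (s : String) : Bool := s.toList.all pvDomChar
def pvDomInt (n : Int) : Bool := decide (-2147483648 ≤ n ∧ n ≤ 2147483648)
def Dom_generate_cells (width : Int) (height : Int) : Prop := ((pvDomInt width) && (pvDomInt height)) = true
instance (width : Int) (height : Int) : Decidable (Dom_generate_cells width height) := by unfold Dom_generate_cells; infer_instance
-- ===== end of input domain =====

-- B builds the column labels by lexicographic generate-and-take (blocks of all
-- length-k strings) instead of A's per-column bijective base-26 divmod loop;
-- objective: alternative algorithm, same cost.

-- ===== PORT A =====
def pvAlphabet : List Char :=
  ['A','B','C','D','E','F','G','H','I','J','K','L','M',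
   'N','O','P','Q','R','S','T','U','V','W','X','Y','Z']

-- the 'while column:' loop; column values reached are nonnegative, so it is ported on Nat:
-- divmod(column-1, 26) for column = n+1 is (n / 26, n % 26) (Python floordiv = Nat div here).
-- 'alphabet[remainder]' with remainder = n % 26 < 26 is always in range — getD is exact.
def pvALabel : Nat → List Char → List Char
  | 0, acc => acc
  | n + 1, acc => pvALabel (n / 26) (pvAlphabet.getD (n % 26) 'A' :: acc)
decreasing_by exact Nat.lt_succ_of_le (Nat.div_le_self n 26)

def generate_cells (width : Int) (height : Int) : List (String × String) :=
  ((PySem.List.pyRange 1 (width + 1) 1).foldl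
    (fun (d : PySem.Dict String String) column =>
      let col : List Char := pvALabel column.toNat []
      (PySem.List.pyRange 1 (height + 1) 1).foldl
        (fun d row => d.insert (String.mk (col ++ (PySem.Int.toStr row).toList)) "") d)
    PySem.Dict.empty).items

-- ===== PORT B =====
-- the 'while len(labels) < width:' loop, with fuel = width as a totality guard
-- (each iteration appends a nonempty block, so width iterations always suffice).
def pvBLoop (fuel width : Nat) (labels block : List (List Char)) : List (List Char) :=
  match fuel with
  | 0 => labels
  | fuel + 1 =>
    if labels.length < width then
      pvBLoop fuel width
        (labels ++ block.flatMap (fun p => pvAlphabet.map (fun c => p ++ [c])))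
        (block.flatMap (fun p => pvAlphabet.map (fun c => p ++ [c])))
    else labels

def generate_cells_alt (width : Int) (height : Int) : List (String × String) :=
  (((pvBLoop width.toNat width.toNat [] [[]]).take width.toNat).foldl
    (fun (d : PySem.Dict String String) col =>
      (PySem.List.pyRange 1 (height + 1) 1).foldl
        (fun d row => d.insert (String.mk (col ++ (PySem.Int.toStr row).toList)) "") d)
    PySem.Dict.empty).items

-- ===== PRECONDITION & SPEC =====
def Spec_generate_cells (width : Int) (height : Int) (out : List (String × String)) : Prop := out = generate_cells_alt width height
instance (width : Int) (height : Int) (out : List (String × String)) : Decidable (Spec_generate_cells width height out) := by unfold Spec_generate_cells; infer_instance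

-- ===== CLAIM (what is proved, stated in full; the proofs are below) =====
def Claim_equal_generate_cells : Prop := ∀ (width : Int) (height : Int), Dom_generate_cells width height → Spec_generate_cells width height (generate_cells width height)

-- ===== LEMMAS AND PROOFS =====

-- labels numbered a, a+1, …, a+b-1 in A's bijective base-26 encoding
def pvLabs (a b : Nat) : List (List Char) := (List.range' a b).map (fun n => pvALabel n [])

theorem pvALabel_acc (n : Nat) : ∀ acc, pvALabel n acc = pvALabel n [] ++ acc := by
  induction n using Nat.strong_induction_on with
  | _ n ih =>
    intro acc
    match n with
    | 0 => simp [pvALabel]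
    | m + 1 =>
      rw [pvALabel, pvALabel,
        ih (m / 26) (Nat.lt_succ_of_le (Nat.div_le_self m 26)),
        ih (m / 26) (Nat.lt_succ_of_le (Nat.div_le_self m 26)) [pvAlphabet.getD (m % 26) 'A']]
      simp

theorem pvLabs_append (a m n : Nat) : pvLabs a m ++ pvLabs (a + m) n = pvLabs a (m + n) := by
  simp only [pvLabs, ← List.map_append, List.range'_append_1]

theorem pvLabs_length (a b : Nat) : (pvLabs a b).length = b := by simp [pvLabs]

-- the 26 children of label q are exactly labels 26q+1 … 26q+26
theorem pvChildren (q : Nat) :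
    pvAlphabet.map (fun c => pvALabel q [] ++ [c]) = pvLabs (26 * q + 1) 26 := by
  apply List.ext_getElem
  · simp [pvLabs, pvAlphabet]
  · intro i h1 h2
    have hi : i < 26 := by simpa [pvAlphabet] using h1
    simp only [pvLabs, List.getElem_map, List.getElem_range']
    rw [show 26 * q + 1 + 1 * i = (26 * q + i) + 1 by ring, pvALabel, pvALabel_acc,
      show (26 * q + i) / 26 = q by omega, show (26 * q + i) % 26 = i by omega,
      List.getD_eq_getElem _ _ (by simpa [pvAlphabet] using hi)]
    conv_rhs => rw [pvALabel_acc q]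
    simp

theorem pvBlockStep (s b : Nat) :
    (pvLabs s b).flatMap (fun p => pvAlphabet.map (fun c => p ++ [c])) =
      pvLabs (26 * s + 1) (26 * b) := by
  induction b generalizing s with
  | zero => simp [pvLabs]
  | succ b ih =>
    have h1 : pvLabs s (b + 1) = pvLabs s 1 ++ pvLabs (s + 1) b := by
      rw [pvLabs_append, Nat.add_comm]
    have h2 : (pvLabs s 1).flatMap (fun p => pvAlphabet.map (fun c => p ++ [c])) =
        pvLabs (26 * s + 1) 26 := by
      simp only [pvLabs, List.range'_one, List.map_cons, List.map_nil, List.flatMap_cons,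
        List.flatMap_nil, List.append_nil]
      simpa [pvLabs] using pvChildren s
    rw [h1, List.flatMap_append, h2, ih (s + 1),
      show 26 * (s + 1) + 1 = (26 * s + 1) + 26 by ring, pvLabs_append,
      show 26 + 26 * b = 26 * (b + 1) by ring]

-- loop invariant: labels = labels 1..26s, block = labels s..26s (sizes 26s and 25s+1)
theorem pvBLoop_spec (fuel : Nat) : ∀ (w s : Nat), w ≤ 26 * s + 26 * fuel →
    ∃ T, pvBLoop fuel w (pvLabs 1 (26 * s)) (pvLabs s (25 * s + 1)) = pvLabs 1 T ∧ w ≤ T := by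
  induction fuel with
  | zero =>
    intro w s hw
    exact ⟨26 * s, rfl, by omega⟩
  | succ fuel ih =>
    intro w s hw
    rw [pvBLoop]
    by_cases h : (pvLabs 1 (26 * s)).length < w
    · rw [if_pos h, pvBlockStep,
        show pvLabs 1 (26 * s) ++ pvLabs (26 * s + 1) (26 * (25 * s + 1)) =
            pvLabs 1 (26 * (26 * s + 1)) from by
          rw [show (26 * s + 1 : Nat) = 1 + 26 * s by ring, pvLabs_append]; congr 1; ring,
        show 26 * (25 * s + 1) = 25 * (26 * s + 1) + 1 by ring]
      exact ih w (26 * s + 1) (by omega)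
    · rw [if_neg h]
      rw [pvLabs_length] at h
      exact ⟨26 * s, rfl, by omega⟩

-- the first w labels of B's generate-and-take list are A's labels for columns 1..w
theorem pvLabels_eq (w : Nat) :
    (pvBLoop w w [] [[]]).take w = pvLabs 1 w := by
  have h0 : pvLabs 1 0 = ([] : List (List Char)) := by simp [pvLabs]
  have h1 : pvLabs 0 1 = [[]] := by simp [pvLabs, pvALabel]
  have hspec := pvBLoop_spec w w 0 (by omega)
  simp only [Nat.mul_zero, Nat.zero_add] at hspec
  rw [h0, h1] at hspec
  obtain ⟨T, hres, hT⟩ := hspec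
  rw [hres, show T = w + (T - w) by omega, ← pvLabs_append,
    List.take_left' (pvLabs_length 1 w)]

-- ===== VERDICT (by name: the statement is the Claim_ definition above) =====
theorem generate_cells_spec : Claim_equal_generate_cells := by
  intro width height _
  unfold Spec_generate_cells generate_cells generate_cells_alt
  rw [pvLabels_eq width.toNat, pvLabs, List.range'_eq_map_range,
    PySem.List.pyRange_one 1 (width + 1),
    show (width + 1 - 1).toNat = width.toNat by omega,
    List.map_map, List.foldl_map, List.foldl_map]
  simp only [show ∀ k : Nat, ((1 : Int) + (k : Int)).toNat = 1 + k from fun k => by omega,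
    Function.comp]
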